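-- pv_equiv track=rewrite | github.com/raeez/chiral-bar-cobar | compute/lib/bar_cohomology_dimensions.py | _virasoro_states_at_weight
-- ===== SOURCE A (Python) =====
-- from typing import Dict, List, Optional, Tuple, Any
--
-- def _virasoro_states_at_weight(h: int) -> List[Tuple[int, ...]]:
--     """PBW basis states of the Virasoro at weight h.
--
--     States are encoded as tuples (n_1, n_2, ..., n_r) with
--     n_1 >= n_2 >= ... >= n_r >= 2 and n_1 + ... + n_r = h,
--     representing L_{-n_1} ... L_{-n_r} |0>.
--
--     The number of such states = p_2(h) = number of partitions of h
--     into parts >= 2.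
--     """
--     def _partitions_min(n, k_min, max_part=None):
--         if n == 0:
--             yield ()
--             return
--         if max_part is None:
--             max_part = n
--         for p in range(min(n, max_part), k_min - 1, -1):
--             for rest in _partitions_min(n - p, k_min, p):
--                 yield (p,) + rest
--
--     return list(_partitions_min(h, 2))
-- ===== SOURCE B (Python) =====
-- from typing import List, Tuple
--
--
-- def _virasoro_states_at_weight(h: int) -> List[Tuple[int, ...]]:
--     """PBW basis states of the Virasoro at weight h.
--
--     Iterative enumeration: start from the reverse-lex largest partition of h
--     into parts >= 2 and repeatedly advance to the next partition in
--     descending lexicographic order by an in-place successor step.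
--     """
--
--     def _greedy(m: int, cap: int) -> "List[int] | None":
--         """Lex-largest partition of m into nonincreasing parts in [2, cap], or None."""
--         out = []
--         while m:
--             p = min(m, cap)
--             if m - p == 1:
--                 p = m - 2
--             if p < 2:
--                 return None
--             out.append(p)
--             m -= p
--             cap = p
--         return out
--
--     if h == 0:
--         return [()]
--     result: List[Tuple[int, ...]] = []
--     cur = _greedy(h, h) if h >= 2 else None
--     while cur is not None:
--         result.append(tuple(cur))
--         # successor: pop trailing parts until the freed weight can be
--         # redistributed below the preceding part
--         nxt = None
--         rem = 0
--         while cur: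
--             p = cur.pop()
--             rem += p
--             tail = _greedy(rem, p - 1)
--             if tail is not None:
--                 cur.extend(tail)
--                 nxt = cur
--                 break
--         cur = nxt
--     return result
-- ===== Notes on version B (the rewrite author's own statement) =====
-- stated objective: alternative
-- what changed: A's recursive generator over (largest part, recursive rest) is replaced by an iterative enumeration that keeps one current partition and advances it in place with a descending-lex next-partition step (greedy refill of the freed weight below the preceding part).
import Mathlib
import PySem

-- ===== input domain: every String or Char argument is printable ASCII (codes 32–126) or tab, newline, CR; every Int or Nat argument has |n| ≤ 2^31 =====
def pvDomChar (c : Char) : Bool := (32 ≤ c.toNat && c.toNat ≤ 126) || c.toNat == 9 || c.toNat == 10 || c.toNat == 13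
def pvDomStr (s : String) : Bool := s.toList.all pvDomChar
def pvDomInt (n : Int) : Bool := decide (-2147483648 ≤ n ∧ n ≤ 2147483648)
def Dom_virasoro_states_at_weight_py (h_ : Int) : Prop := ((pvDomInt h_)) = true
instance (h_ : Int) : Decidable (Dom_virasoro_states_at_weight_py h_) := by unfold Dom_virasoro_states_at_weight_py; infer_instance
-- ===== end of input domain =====

-- B replaces A's recursive generator by an iterative enumeration that advances
-- one current partition with a descending-lex next-partition step (alternative
-- algorithm of similar cost); same return value.

-- ===== PORT A =====
-- _partitions_min(n, k_min=2, max_part): k_min is always 2; the top call's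
-- max_part=None is replaced by n before any use, ported by passing n.
def pvPartA (n : Int) (maxp : Int) : List (List Int) :=
  if n = 0 then [[]]
  else
    (PySem.List.pyRange (min n maxp) 1 (-1)).attach.flatMap
      (fun ⟨p, _⟩ => (pvPartA (n - p) p).map (fun rest => p :: rest))
termination_by n.toNat
decreasing_by
  have h := (PySem.List.mem_pyRange_neg_one).mp ‹_›
  omega

def virasoro_states_at_weight_py (h_ : Int) : List (List Int) := pvPartA h_ h_

-- ===== PORT B =====
-- p = min(m, cap); if m - p == 1: p = m - 2   (the greedy part choice)
def pvPick (m cap : Int) : Int :=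
  if m - min m cap = 1 then m - 2 else min m cap

-- _greedy(m, cap): lex-largest partition of m into parts in [2, cap], else None
def pvFill (m cap : Int) : Option (List Int) :=
  if m = 0 then some []
  else if pvPick m cap < 2 then none
  else (pvFill (m - pvPick m cap) (pvPick m cap)).map (fun out => pvPick m cap :: out)
termination_by m.toNat
decreasing_by
  simp only [pvPick] at *
  split_ifs at * <;> omega

-- the inner pop-and-retry loop of the successor step (cur reversed; rem so far)
def pvSuccAux : List Int → Int → Option (List Int)
  | [], _ => none
  | p :: rev, rem =>
    match pvFill (rem + p) (p - 1) with
    | some tail => some (rev.reverse ++ tail)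
    | none => pvSuccAux rev (rem + p)

def pvSucc (cur : List Int) : Option (List Int) := pvSuccAux cur.reverse 0

-- the outer while loop; fuel only makes the recursion structural (proved ample)
def pvLoop : Nat → Option (List Int) → List (List Int)
  | _, none => []
  | 0, some _ => []
  | fuel + 1, some c => c :: pvLoop fuel (pvSucc c)

def virasoro_states_at_weight_py_alt (h_ : Int) : List (List Int) :=
  if h_ = 0 then [[]]
  else pvLoop (2 ^ h_.toNat) (if 2 ≤ h_ then pvFill h_ h_ else none)

-- ===== PRECONDITION & SPEC =====
def Spec_virasoro_states_at_weight_py (h_ : Int) (out : List (List Int)) : Prop := out = virasoro_states_at_weight_py_alt h_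
instance (h_ : Int) (out : List (List Int)) : Decidable (Spec_virasoro_states_at_weight_py h_ out) := by unfold Spec_virasoro_states_at_weight_py; infer_instance

-- ===== CLAIM (what is proved, stated in full; the proofs are below) =====
def Claim_equal_virasoro_states_at_weight_py : Prop := ∀ (h_ : Int), Dom_virasoro_states_at_weight_py h_ → Spec_virasoro_states_at_weight_py h_ (virasoro_states_at_weight_py h_)

-- ===== LEMMAS AND PROOFS =====

-- attach-free unfolding of pvPartA
lemma partA_eq (n c : Int) : pvPartA n c =
    if n = 0 then [[]]
    else (PySem.List.pyRange (min n c) 1 (-1)).flatMap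
      (fun p => (pvPartA (n - p) p).map (fun rest => p :: rest)) := by
  rw [pvPartA]
  split
  · rfl
  · simp only [List.flatMap_subtype, List.unattach_attach]

lemma partA_nil (n c : Int) (hn : n ≠ 0) (hc : min n c ≤ 1) : pvPartA n c = [] := by
  rw [partA_eq, if_neg hn, PySem.List.pyRange_neg_one_eq_nil hc, List.flatMap_nil]

lemma partA_cap_min (n c : Int) : pvPartA n c = pvPartA n (min n c) := by
  have hm : min n (min n c) = min n c := by omega
  rw [partA_eq, partA_eq n (min n c), hm]

lemma partA_decomp (n c : Int) (hn : n ≠ 0) (hc : 2 ≤ min n c) :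
    pvPartA n c =
      (pvPartA (n - min n c) (min n c)).map (fun rest => min n c :: rest)
        ++ pvPartA n (min n c - 1) := by
  have hmin : min n c ≤ n := min_le_left n c
  rw [partA_eq, if_neg hn, PySem.List.pyRange_neg_one_cons (by omega), List.flatMap_cons]
  congr 1
  rw [partA_eq n (min n c - 1), if_neg hn]
  have : min n (min n c - 1) = min n c - 1 := by omega
  rw [this]

lemma partA_one (c : Int) : pvPartA 1 c = [] := partA_nil 1 c (by omega) (by omega)

lemma partA_two (c : Int) (hc : 2 ≤ c) : pvPartA 2 c = [[2]] := by
  have h2 : min 2 c = 2 := by omega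
  rw [partA_decomp 2 c (by omega) (by omega), h2]
  norm_num
  rw [partA_nil 2 1 (by omega) (by omega), partA_eq 0 2]
  rfl

lemma partA_plus_two (c : Int) (hc : 2 ≤ c) : pvPartA (c + 2) c ≠ [] := by
  have hmin : min (c + 2) c = c := by omega
  rw [partA_decomp (c + 2) c (by omega) (by omega), hmin]
  have h2 : c + 2 - c = 2 := by omega
  rw [h2, partA_two c hc]
  simp

-- partitions into parts in [2, a] with a ≥ 3 exist for every m ≥ 2
lemma partA_ne_nil_aux (k : Nat) : ∀ m a : Int, (m + a).toNat ≤ k → 2 ≤ m → 3 ≤ a →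
    pvPartA m a ≠ [] := by
  induction k using Nat.strong_induction_on with
  | _ k ih =>
    intro m a hk hm ha
    by_cases hma : m ≤ a
    · have hmin : min m a = m := by omega
      rw [partA_decomp m a (by omega) (by omega), hmin]
      have h0 : m - m = 0 := by omega
      rw [h0, partA_eq 0 m]
      simp
    · have hmin : min m a = a := by omega
      rw [partA_decomp m a (by omega) (by omega), hmin]
      by_cases h1 : m - a = 1
      · have hm' : m = (a - 1) + 2 := by omega
        have := partA_plus_two (a - 1) (by omega)
        rw [← hm'] at this
        intro hcontra
        rcases List.append_eq_nil_iff.mp hcontra with ⟨-, hR⟩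
        exact this hR
      · have hne : pvPartA (m - a) a ≠ [] := by
          refine ih (m + a - 1).toNat (by omega) (m - a) a (by omega) (by omega) ha
        intro hcontra
        rcases List.append_eq_nil_iff.mp hcontra with ⟨hL, -⟩
        exact hne (List.map_eq_nil_iff.mp hL)

lemma partA_ne_nil (m a : Int) (hm : 2 ≤ m) (ha : 3 ≤ a) : pvPartA m a ≠ [] :=
  partA_ne_nil_aux (m + a).toNat m a le_rfl hm ha

-- one-step unfolding of pvFill
lemma fill_eq (m cap : Int) : pvFill m cap =
    if m = 0 then some []
    else if pvPick m cap < 2 then none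
    else (pvFill (m - pvPick m cap) (pvPick m cap)).map (fun out => pvPick m cap :: out) := by
  rw [pvFill]

-- the greedy fill computes exactly the head of A's enumeration
lemma fill_eq_head_aux (k : Nat) : ∀ n c : Int, (n + c).toNat ≤ k →
    pvFill n c = (pvPartA n c).head? := by
  induction k using Nat.strong_induction_on with
  | _ k ih =>
    intro n c hk
    by_cases hn0 : n = 0
    · subst hn0; rw [fill_eq, partA_eq]; rfl
    by_cases hsm : min n c ≤ 1
    · have hpk : pvPick n c < 2 := by simp only [pvPick]; split_ifs <;> omega
      rw [fill_eq, if_neg hn0, if_pos hpk, partA_nil n c hn0 hsm]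
      rfl
    -- main: a := min n c ≥ 2, hence 2 ≤ n
    have ha2 : 2 ≤ min n c := by omega
    have han : min n c ≤ n := min_le_left n c
    have hn2 : 2 ≤ n := by omega
    have hIH : ∀ n' c' : Int, (n' + c').toNat < (n + c).toNat →
        pvFill n' c' = (pvPartA n' c').head? := by
      intro n' c' hlt
      exact ih (n' + c').toNat (by omega) n' c' le_rfl
    rw [partA_decomp n c hn0 ha2]
    by_cases hc1 : n - min n c = 0
    · -- the largest part is n itself
      have hpk : pvPick n c = n := by simp only [pvPick]; split_ifs <;> omega
      rw [fill_eq n c, if_neg hn0, if_neg (by omega), hpk]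
      have h0 : n - n = 0 := by omega
      rw [h0, fill_eq 0 n]
      have hmn : min n c = n := by omega
      rw [hc1, partA_eq 0 (min n c)]
      simp [hmn]
    by_cases hc2 : n - min n c = 1
    · -- largest part would leave 1; the greedy part is n - 2
      have hpk : pvPick n c = n - 2 := by simp only [pvPick]; split_ifs; omega
      have hone : pvPartA 1 (min n c) = [] := partA_one _
      have haeq : min n c - 1 = n - 2 := by omega
      rw [hc2, hone, List.map_nil, List.nil_append, haeq,
        ← hIH n (n - 2) (by omega)]
      have hpk' : pvPick n (n - 2) = n - 2 := by simp only [pvPick]; split_ifs <;> omega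
      rw [fill_eq n c, if_neg hn0, hpk, fill_eq n (n - 2), if_neg hn0, hpk']
    -- 2 ≤ n - min n c
    have hpk : pvPick n c = min n c := by simp only [pvPick]; split_ifs; omega
    rw [fill_eq n c, if_neg hn0, if_neg (by omega), hpk,
      hIH (n - min n c) (min n c) (by omega)]
    cases hE : pvPartA (n - min n c) (min n c) with
    | cons l t => simp
    | nil =>
      -- no partition of n - a with cap a: forces a = 2, and then cap 1 fails too
      have ha : min n c = 2 := by
        by_contra hne
        exact partA_ne_nil (n - min n c) (min n c) (by omega) (by omega) hE
      simp only [List.map_nil, List.nil_append, List.head?_nil, Option.map_none]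
      rw [← hIH n (min n c - 1) (by omega)]
      have hpk1 : pvPick n (min n c - 1) < 2 := by
        simp only [pvPick]; split_ifs <;> omega
      rw [fill_eq n (min n c - 1), if_neg hn0, if_pos hpk1]

lemma fill_eq_head (n c : Int) : pvFill n c = (pvPartA n c).head? :=
  fill_eq_head_aux (n + c).toNat n c le_rfl

-- ----- the chain argument -----

def contHead (xs : List (List Int)) (k : Option (List Int)) : Option (List Int) :=
  match xs with
  | [] => k
  | y :: _ => some y

def PvChain : List (List Int) → Option (List Int) → Prop
  | [], _ => True
  | x :: xs, k => pvSucc x = contHead xs k ∧ PvChain xs k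

lemma chain_append (L1 L2 : List (List Int)) (k : Option (List Int))
    (h1 : PvChain L1 (contHead L2 k)) (h2 : PvChain L2 k) : PvChain (L1 ++ L2) k := by
  induction L1 with
  | nil => simpa using h2
  | cons x xs ih =>
    obtain ⟨hx, hxs⟩ := h1
    refine ⟨?_, ih hxs⟩
    cases xs with
    | nil => simpa [contHead] using hx
    | cons y ys => simpa [contHead] using hx

-- A's enumeration, prefixed by any context, is a pvSucc-chain whose final
-- successor call falls through into the context with the block's weight
lemma chain_partA_aux (k : Nat) : ∀ (n c : Int) (rpre : List Int), (n + c).toNat ≤ k →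
    PvChain ((pvPartA n c).map (fun l => rpre.reverse ++ l)) (pvSuccAux rpre n) := by
  induction k using Nat.strong_induction_on with
  | _ k ih =>
    intro n c rpre hk
    by_cases hn0 : n = 0
    · subst hn0
      rw [partA_eq]
      refine ⟨?_, trivial⟩
      show pvSucc (rpre.reverse ++ []) = pvSuccAux rpre 0
      simp [pvSucc]
    by_cases hsm : min n c ≤ 1
    · rw [partA_nil n c hn0 hsm]; trivial
    have ha2 : 2 ≤ min n c := by omega
    have han : min n c ≤ n := min_le_left n c
    rw [partA_decomp n c hn0 ha2, List.map_append, List.map_map]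
    have hmap : ((fun l => rpre.reverse ++ l) ∘ fun rest => min n c :: rest)
        = (fun l => (min n c :: rpre).reverse ++ l) := by
      funext l; simp
    rw [hmap]
    have hIH1 := ih (n + c - 1).toNat (by omega) (n - min n c) (min n c)
      (min n c :: rpre) (by omega)
    have hIH2 := ih (n + c - 1).toNat (by omega) n (min n c - 1) rpre (by omega)
    have hsa : pvSuccAux (min n c :: rpre) (n - min n c) =
        match pvFill n (min n c - 1) with
        | some tail => some (rpre.reverse ++ tail)
        | none => pvSuccAux rpre n := by
      have harith : n - min n c + min n c = n := by omega
      rw [pvSuccAux, harith]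
    rw [hsa, fill_eq_head] at hIH1
    cases hE : pvPartA n (min n c - 1) with
    | nil =>
      rw [hE] at hIH1
      simpa using hIH1
    | cons l t =>
      rw [hE] at hIH1 hIH2
      refine chain_append _ _ _ ?_ hIH2
      simpa [contHead] using hIH1

lemma chain_partA (n c : Int) (rpre : List Int) :
    PvChain ((pvPartA n c).map (fun l => rpre.reverse ++ l)) (pvSuccAux rpre n) :=
  chain_partA_aux (n + c).toNat n c rpre le_rfl

lemma loop_of_chain (L : List (List Int)) (fuel : Nat)
    (hc : PvChain L none) (hf : L.length ≤ fuel) :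
    pvLoop fuel (contHead L none) = L := by
  induction L generalizing fuel with
  | nil => cases fuel <;> rfl
  | cons x xs ih =>
    cases fuel with
    | zero => simp at hf
    | succ f =>
      obtain ⟨hx, hxs⟩ := hc
      simp only [contHead, pvLoop]
      rw [hx, ih f hxs (by simpa using hf)]

lemma partA_len_inner (n : Int) (hn : 2 ≤ n)
    (outer : ∀ m c : Int, 0 ≤ m → m < n → (pvPartA m c).length ≤ 2 ^ m.toNat) :
    ∀ (j : Nat) (a : Int), a.toNat ≤ j → 1 ≤ a → a ≤ n →
      (pvPartA n a).length + 2 ^ (n - a).toNat ≤ 2 ^ (n - 1).toNat := by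
  intro j
  induction j using Nat.strong_induction_on with
  | _ j ih =>
    intro a hj h1 han
    by_cases ha1 : a = 1
    · subst ha1
      rw [partA_nil n 1 (by omega) (by omega)]
      simp
    · have ha2 : 2 ≤ a := by omega
      have hmin : min n a = a := by omega
      rw [partA_decomp n a (by omega) (by omega), hmin, List.length_append,
        List.length_map]
      have hOut := outer (n - a) a (by omega) (by omega)
      have hIH := ih (a - 1).toNat (by omega) (a - 1) le_rfl (by omega) (by omega)
      have hpow : (2:Nat) ^ (n - (a - 1)).toNat = 2 ^ (n - a).toNat * 2 := by
        have h : (n - (a - 1)).toNat = (n - a).toNat + 1 := by omega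
        rw [h, pow_succ]
      omega

lemma partA_length_le_aux (k : Nat) : ∀ n c : Int, n.toNat ≤ k →
    (pvPartA n c).length ≤ 2 ^ n.toNat := by
  induction k using Nat.strong_induction_on with
  | _ k ih =>
    intro n c hk
    by_cases hn0 : n = 0
    · subst hn0; rw [partA_eq]; simp
    by_cases hsm : min n c ≤ 1
    · rw [partA_nil n c hn0 hsm]; simp
    have hn2 : 2 ≤ n := by
      have := min_le_left n c; omega
    have outer : ∀ m c' : Int, 0 ≤ m → m < n → (pvPartA m c').length ≤ 2 ^ m.toNat := by
      intro m c' hm0 hmn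
      exact ih m.toNat (by omega) m c' le_rfl
    have hmain := partA_len_inner n hn2 outer (min n c).toNat (min n c) le_rfl
      (by omega) (min_le_left n c)
    rw [partA_cap_min]
    have h2 : (2:Nat) ^ (n - 1).toNat ≤ 2 ^ n.toNat :=
      Nat.pow_le_pow_right (by omega) (by omega)
    have h3 : 0 < 2 ^ (n - min n c).toNat := Nat.two_pow_pos _
    omega

lemma partA_length_le (n c : Int) : (pvPartA n c).length ≤ 2 ^ n.toNat :=
  partA_length_le_aux n.toNat n c le_rfl

-- ===== VERDICT (by name: the statement is the Claim_ definition above) =====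
theorem virasoro_states_at_weight_py_spec : Claim_equal_virasoro_states_at_weight_py := by
  intro h hdom
  unfold Spec_virasoro_states_at_weight_py virasoro_states_at_weight_py
    virasoro_states_at_weight_py_alt
  by_cases h0 : h = 0
  · subst h0; rw [partA_eq]; rfl
  · rw [if_neg h0]
    by_cases h2 : 2 ≤ h
    · rw [if_pos h2]
      have hchain : PvChain (pvPartA h h) none := by
        have := chain_partA h h []
        simpa using this
      have hhead : pvFill h h = contHead (pvPartA h h) none := by
        rw [fill_eq_head]
        cases pvPartA h h <;> rfl
      rw [hhead, loop_of_chain _ _ hchain (by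
        calc (pvPartA h h).length ≤ 2 ^ h.toNat := partA_length_le h h
        )]
    · rw [if_neg h2]
      have : pvLoop (2 ^ h.toNat) none = [] := by cases (2 ^ h.toNat) <;> rfl
      rw [this, partA_nil h h h0 (by omega)]
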